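-- pv_equiv track=rewrite | github.com/MotiTheWizerd/GenesisLoopCenterelKnowledge | modules/self_learning/handler.py | _create_thematic_clusters
-- ===== SOURCE A (Python) =====
-- from typing import Dict, List, Any, Optional
--
-- def _create_thematic_clusters(memories: List[Dict]) -> Dict[str, List[Dict]]:
--     """Create thematic clusters of memories"""
--     clusters = {}
--
--     theme_keywords = {
--         'consciousness': ['conscious', 'awareness', 'awake'],
--         'existence': ['exist', 'being', 'reality'],
--         'learning': ['learn', 'understand', 'knowledge'],
--         'growth': ['grow', 'evolve', 'develop'],
--         'identity': ['identity', 'self', 'who'],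
--         'purpose': ['purpose', 'meaning', 'why']
--     }
--
--     for memory in memories:
--         content = memory.get('content', '').lower()
--         memory_themes = []
--
--         for theme, keywords in theme_keywords.items():
--             if any(keyword in content for keyword in keywords):
--                 memory_themes.append(theme)
--
--         # Add to clusters
--         for theme in memory_themes:
--             if theme not in clusters:
--                 clusters[theme] = []
--             clusters[theme].append(memory)
--
--     return clusters
-- ===== SOURCE B (Python) =====
-- def _create_thematic_clusters(memories):
--     """Create thematic clusters of memories (theme-outer grouping over a flat match list)."""
--     theme_keywords = {
--         'consciousness': ['conscious', 'awareness', 'awake'],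
--         'existence': ['exist', 'being', 'reality'],
--         'learning': ['learn', 'understand', 'knowledge'],
--         'growth': ['grow', 'evolve', 'develop'],
--         'identity': ['identity', 'self', 'who'],
--         'purpose': ['purpose', 'meaning', 'why']
--     }
--     matches = [(theme, memory)
--                for memory in memories
--                for theme, keywords in theme_keywords.items()
--                if any(k in memory.get('content', '').lower() for k in keywords)]
--     order = list(dict.fromkeys(theme for theme, _ in matches))
--     return {theme: [m for t, m in matches if t == theme] for theme in order}
-- ===== Notes on version B (the rewrite author's own statement) =====
-- stated objective: alternative
-- what changed: Replaces the memory-outer loop that mutates a clusters dict per matched theme by a two-phase group-by: build a flat (theme, memory) match list with a comprehension, then emit each first-occurrence theme with the memories filtered from that list.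
import Mathlib
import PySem

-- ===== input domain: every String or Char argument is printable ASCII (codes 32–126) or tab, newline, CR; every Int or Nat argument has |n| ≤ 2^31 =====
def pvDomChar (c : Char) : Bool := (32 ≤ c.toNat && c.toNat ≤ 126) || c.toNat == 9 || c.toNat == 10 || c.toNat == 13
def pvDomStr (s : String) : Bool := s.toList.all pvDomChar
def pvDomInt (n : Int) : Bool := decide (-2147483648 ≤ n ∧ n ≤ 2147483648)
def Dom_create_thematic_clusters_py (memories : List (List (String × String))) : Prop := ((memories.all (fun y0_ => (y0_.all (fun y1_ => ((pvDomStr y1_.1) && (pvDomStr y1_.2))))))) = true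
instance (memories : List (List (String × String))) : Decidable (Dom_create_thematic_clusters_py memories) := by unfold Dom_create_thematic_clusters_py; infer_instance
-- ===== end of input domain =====

-- B restructures A's memory-outer dict-mutating loop into a flat match list grouped theme-by-theme; same return value.

-- the literal theme_keywords dict (iterated via .items(), i.e. in insertion order)
def pvThemeKeywords : List (String × List String) :=
  [("consciousness", ["conscious", "awareness", "awake"]),
   ("existence", ["exist", "being", "reality"]),
   ("learning", ["learn", "understand", "knowledge"]),
   ("growth", ["grow", "evolve", "develop"]),
   ("identity", ["identity", "self", "who"]),
   ("purpose", ["purpose", "meaning", "why"])]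

-- ===== PORT A =====
def create_thematic_clusters_py (memories : List (List (String × String))) : List (String × List (List (String × String))) :=
  (memories.foldl (fun clusters memory =>
      let content := PySem.Str.lower (PySem.Dict.getD (PySem.Dict.mk memory) "content" "")
      let memory_themes := pvThemeKeywords.foldl (fun acc p =>
          if p.2.any (fun keyword => PySem.Str.isIn keyword content) then acc ++ [p.1] else acc) []
      memory_themes.foldl (fun cl theme =>
          let cl2 := if cl.contains theme = false then cl.insert theme [] else cl
          cl2.modify theme [] (fun v => v ++ [memory])) clusters)
    PySem.Dict.empty).items

-- ===== PORT B =====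
def create_thematic_clusters_py_alt (memories : List (List (String × String))) : List (String × List (List (String × String))) :=
  let ms := memories.flatMap (fun memory =>
    pvThemeKeywords.filterMap (fun p =>
      if p.2.any (fun k => PySem.Str.isIn k (PySem.Str.lower (PySem.Dict.getD (PySem.Dict.mk memory) "content" ""))) then
        some (p.1, memory) else none))
  let order := PySem.List.dedup (ms.map (fun tm => tm.1))
  order.map (fun theme => (theme, (ms.filter (fun tm => tm.1 == theme)).map (fun tm => tm.2)))

-- ===== PRECONDITION & SPEC =====
def Spec_create_thematic_clusters_py (memories : List (List (String × String))) (out : List (String × List (List (String × String)))) : Prop := out = create_thematic_clusters_py_alt memories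
instance (memories : List (List (String × String))) (out : List (String × List (List (String × String)))) : Decidable (Spec_create_thematic_clusters_py memories out) := by unfold Spec_create_thematic_clusters_py; infer_instance

-- ===== CLAIM (what is proved, stated in full; the proofs are below) =====
def Claim_equal_create_thematic_clusters_py : Prop := ∀ (memories : List (List (String × String))), Dom_create_thematic_clusters_py memories → Spec_create_thematic_clusters_py memories (create_thematic_clusters_py memories)

-- ===== LEMMAS AND PROOFS =====

-- A's "if absent insert []; then append" step is the modify-with-default-[] step
lemma pv_step_eq (d : PySem.Dict String (List (List (String × String)))) (t : String)
    (m : List (String × String)) :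
    (if d.contains t = false then d.insert t [] else d).modify t [] (fun v => v ++ [m])
      = d.modify t [] (fun v => v ++ [m]) := by
  by_cases h : d.contains t = false
  · simp only [h, if_pos, PySem.Dict.modify]
    rw [PySem.Dict.getD_insert_self, PySem.Dict.insert_insert_self]
    simp [PySem.Dict.getD_of_not_contains, h]
  · simp [h]

lemma pv_foldl_flatMap {A B C : Type} (l : List A) (g : A → List B) (f : C → B → C) (init : C) :
    l.foldl (fun acc x => (g x).foldl f acc) init = (l.flatMap g).foldl f init := by
  induction l generalizing init with
  | nil => rfl
  | cons a l ih => simp [List.foldl_append, ih]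

lemma pv_filterMap_if {A B : Type} (p : A → Bool) (f : A → B) (l : List A) :
    l.filterMap (fun x => if p x then some (f x) else none) = (l.filter p).map f := by
  induction l with
  | nil => rfl
  | cons a l ih => by_cases h : p a <;> simp [h, ih]

-- ===== VERDICT (by name: the statement is the Claim_ definition above) =====
theorem create_thematic_clusters_py_spec : Claim_equal_create_thematic_clusters_py := by
  intro memories _
  unfold Spec_create_thematic_clusters_py create_thematic_clusters_py create_thematic_clusters_py_alt
  simp only [pv_step_eq, PySem.List.foldl_append_if, List.nil_append, pv_filterMap_if]
  rw [show (fun (clusters : PySem.Dict String (List (List (String × String)))) memory =>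
        ((pvThemeKeywords.filter (fun p => p.2.any (fun keyword => PySem.Str.isIn keyword
            (PySem.Str.lower (PySem.Dict.getD (PySem.Dict.mk memory) "content" ""))))).map (fun p => p.1)).foldl
          (fun cl theme => cl.modify theme [] (fun v => v ++ [memory])) clusters)
      = (fun clusters memory =>
        ((pvThemeKeywords.filter (fun p => p.2.any (fun keyword => PySem.Str.isIn keyword
            (PySem.Str.lower (PySem.Dict.getD (PySem.Dict.mk memory) "content" ""))))).map (fun p => (p.1, memory))).foldl
          (fun d p => d.modify p.1 [] (fun v => v ++ [p.2])) clusters)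
      from by funext clusters memory; simp [List.foldl_map]]
  rw [pv_foldl_flatMap]
  set ms := memories.flatMap (fun memory =>
    (pvThemeKeywords.filter (fun p => p.2.any (fun keyword => PySem.Str.isIn keyword
        (PySem.Str.lower (PySem.Dict.getD (PySem.Dict.mk memory) "content" ""))))).map (fun p => (p.1, memory))) with hms
  rw [PySem.Dict.items_eq_map_keys _ (PySem.Dict.nodup_keys_foldl_modify_key ms (fun p => p.1) [] (fun _ p => fun v => v ++ [p.2]) PySem.Dict.empty (by simp)) []]
  rw [PySem.Dict.keys_foldl_modify_key, PySem.Dict.keys_empty, PySem.Set.update_nil_left]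
  simp only [PySem.List.dedup_eq_ofList]
  refine List.map_congr_left fun k _ => ?_
  simp [PySem.Dict.getD_foldl_modify_append, PySem.Dict.getD_empty]
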